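-- pv_equiv track=rewrite | github.com/andrewkwatts-maker/periodica | tests/test_json_validation.py | _geometries_match
-- ===== SOURCE A (Python) =====
-- def _geometries_match(json_geom: str, calc_geom: str) -> bool:
--     """Check if geometries match (case-insensitive, handles synonyms)."""
--     if not json_geom or not calc_geom:
--         return False
--
--     json_lower = json_geom.lower().strip()
--     calc_lower = calc_geom.lower().strip()
--
--     if json_lower == calc_lower:
--         return True
--
--     # Handle common synonyms
--     synonyms = {
--         'trigonal pyramidal': ['trigonal-pyramidal', 'pyramidal'],
--         'trigonal planar': ['trigonal-planar', 'planar'],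
--         'tetrahedral': ['tetrahedron'],
--         'linear': ['diatomic'],
--         'bent': ['angular', 'v-shaped'],
--         'octahedral': ['octahedron'],
--         'square planar': ['square-planar']
--     }
--
--     for canonical, alts in synonyms.items():
--         all_forms = [canonical] + alts
--         if json_lower in all_forms and calc_lower in all_forms:
--             return True
--
--     return False
-- ===== SOURCE B (Python) =====
-- # Flat normalization table written out once: every accepted form -> its canonical name.
-- _CANON = {
--     'trigonal pyramidal': 'trigonal pyramidal',
--     'trigonal-pyramidal': 'trigonal pyramidal',
--     'pyramidal': 'trigonal pyramidal',
--     'trigonal planar': 'trigonal planar',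
--     'trigonal-planar': 'trigonal planar',
--     'planar': 'trigonal planar',
--     'tetrahedral': 'tetrahedral',
--     'tetrahedron': 'tetrahedral',
--     'linear': 'linear',
--     'diatomic': 'linear',
--     'bent': 'bent',
--     'angular': 'bent',
--     'v-shaped': 'bent',
--     'octahedral': 'octahedral',
--     'octahedron': 'octahedral',
--     'square planar': 'square planar',
--     'square-planar': 'square planar',
-- }
--
--
-- def _geometries_match(json_geom: str, calc_geom: str) -> bool:
--     """Check if geometries match (case-insensitive, handles synonyms)."""
--     if not json_geom or not calc_geom:
--         return False
--
--     json_lower = json_geom.lower().strip()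
--     calc_lower = calc_geom.lower().strip()
--
--     # Normalize each string to its canonical form (itself if unknown) and compare.
--     return _CANON.get(json_lower, json_lower) == _CANON.get(calc_lower, calc_lower)
-- ===== Notes on version B (the rewrite author's own statement) =====
-- stated objective: simpler
-- what changed: Replaces the per-call scan over synonym groups (and the equal-strings early return) by a flat form-to-canonical literal dict in which every canonical maps to itself, so matching is a single comparison of two normalized lookups with the string itself as default.
import Mathlib
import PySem

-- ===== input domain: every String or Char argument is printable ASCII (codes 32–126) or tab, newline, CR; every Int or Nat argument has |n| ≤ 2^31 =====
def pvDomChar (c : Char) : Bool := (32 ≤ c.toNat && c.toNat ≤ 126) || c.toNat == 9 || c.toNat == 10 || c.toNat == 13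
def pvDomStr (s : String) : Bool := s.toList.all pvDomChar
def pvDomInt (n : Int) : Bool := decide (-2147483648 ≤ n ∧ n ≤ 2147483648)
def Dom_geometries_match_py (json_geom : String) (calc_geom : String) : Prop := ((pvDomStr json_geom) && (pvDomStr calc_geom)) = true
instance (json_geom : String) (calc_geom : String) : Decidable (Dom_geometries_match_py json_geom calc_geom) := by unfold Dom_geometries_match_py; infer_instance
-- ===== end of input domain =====

-- B replaces A's per-call scan over synonym groups by a flat form→canonical literal dict
-- (every canonical maps to itself), so matching is one comparison of two defaulted lookups (simpler; no speed claim).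

-- ===== PORT A =====
def pvSynonyms : List (String × List String) :=
  [("trigonal pyramidal", ["trigonal-pyramidal", "pyramidal"]),
   ("trigonal planar", ["trigonal-planar", "planar"]),
   ("tetrahedral", ["tetrahedron"]),
   ("linear", ["diatomic"]),
   ("bent", ["angular", "v-shaped"]),
   ("octahedral", ["octahedron"]),
   ("square planar", ["square-planar"])]

-- the for-loop over synonyms.items() with early return True
def pvALoop : List (String × List String) → String → String → Bool
  | [], _, _ => false
  | (canonical, alts) :: rest, jl, cl =>
    let all_forms := canonical :: alts
    if all_forms.contains jl && all_forms.contains cl then true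
    else pvALoop rest jl cl

def geometries_match_py (json_geom : String) (calc_geom : String) : Bool :=
  if json_geom.isEmpty || calc_geom.isEmpty then false
  else
    let json_lower := PySem.Str.strip (PySem.Str.lower json_geom)
    let calc_lower := PySem.Str.strip (PySem.Str.lower calc_geom)
    if json_lower == calc_lower then true
    else pvALoop pvSynonyms json_lower calc_lower

-- ===== PORT B =====
-- the _CANON dict literal (distinct keys, insertion order)
def pvCanon : PySem.Dict String String :=
  PySem.Dict.ofList
    [("trigonal pyramidal", "trigonal pyramidal"),
     ("trigonal-pyramidal", "trigonal pyramidal"),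
     ("pyramidal", "trigonal pyramidal"),
     ("trigonal planar", "trigonal planar"),
     ("trigonal-planar", "trigonal planar"),
     ("planar", "trigonal planar"),
     ("tetrahedral", "tetrahedral"),
     ("tetrahedron", "tetrahedral"),
     ("linear", "linear"),
     ("diatomic", "linear"),
     ("bent", "bent"),
     ("angular", "bent"),
     ("v-shaped", "bent"),
     ("octahedral", "octahedral"),
     ("octahedron", "octahedral"),
     ("square planar", "square planar"),
     ("square-planar", "square planar")]

def geometries_match_py_alt (json_geom : String) (calc_geom : String) : Bool :=
  if json_geom.isEmpty || calc_geom.isEmpty then false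
  else
    let json_lower := PySem.Str.strip (PySem.Str.lower json_geom)
    let calc_lower := PySem.Str.strip (PySem.Str.lower calc_geom)
    pvCanon.getD json_lower json_lower == pvCanon.getD calc_lower calc_lower

-- ===== PRECONDITION & SPEC =====
def Spec_geometries_match_py (json_geom : String) (calc_geom : String) (out : Bool) : Prop := out = geometries_match_py_alt json_geom calc_geom
instance (json_geom : String) (calc_geom : String) (out : Bool) : Decidable (Spec_geometries_match_py json_geom calc_geom out) := by unfold Spec_geometries_match_py; infer_instance

-- ===== CLAIM (what is proved, stated in full; the proofs are below) =====
def Claim_equal_geometries_match_py : Prop := ∀ (json_geom : String) (calc_geom : String), Dom_geometries_match_py json_geom calc_geom → Spec_geometries_match_py json_geom calc_geom (geometries_match_py json_geom calc_geom)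

-- ===== LEMMAS AND PROOFS =====

-- reference lookup: first group whose form list contains x, yielding its canonical name
def pvLookup : List (String × List String) → String → Option String
  | [], _ => none
  | g :: rest, x => if (g.1 :: g.2).contains x then some g.1 else pvLookup rest x

-- first-match association-list lookup
def pvAssoc : List (String × String) → String → Option String
  | [], _ => none
  | (k, v) :: r, x => if k == x then some v else pvAssoc r x

-- the flattening of the grouped table: exactly pvCanon's items
def pvFlatten (gs : List (String × List String)) : List (String × String) :=
  gs.flatMap (fun g => (g.1 :: g.2).map (fun f => (f, g.1)))

lemma pvCanon_items : pvCanon.items = pvFlatten pvSynonyms := by decide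

lemma pvGet?_mk_eq_assoc (l : List (String × String)) (x : String) :
    (PySem.Dict.mk l).get? x = pvAssoc l x := by
  induction l with
  | nil => rfl
  | cons p r ih =>
    obtain ⟨k, v⟩ := p
    rw [PySem.Dict.get?_mk_cons]
    simp only [pvAssoc, ih]

lemma pvAssoc_group (F : List String) (v : String) (r : List (String × String)) (x : String) :
    pvAssoc (F.map (fun f => (f, v)) ++ r) x =
      (if F.contains x then some v else pvAssoc r x) := by
  induction F with
  | nil => simp
  | cons f F ih =>
    simp only [List.map_cons, List.cons_append, pvAssoc, ih, List.contains_cons]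
    by_cases h : f = x
    · subst h; simp
    · have h1 : (f == x) = false := beq_eq_false_iff_ne.mpr h
      have h2 : (x == f) = false := beq_eq_false_iff_ne.mpr (fun he => h he.symm)
      simp [h1, h2]

lemma pvAssoc_flatten (gs : List (String × List String)) (x : String) :
    pvAssoc (pvFlatten gs) x = pvLookup gs x := by
  induction gs with
  | nil => rfl
  | cons g rest ih =>
    simp only [pvFlatten, List.flatMap_cons] at *
    rw [pvAssoc_group, pvLookup, ih]

lemma pvCanon_get? (x : String) : pvCanon.get? x = pvLookup pvSynonyms x := by
  have h : pvCanon = PySem.Dict.mk (pvFlatten pvSynonyms) := by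
    apply PySem.Dict.ext; exact pvCanon_items
  rw [h, pvGet?_mk_eq_assoc, pvAssoc_flatten]

lemma pvALoop_false_of_notmem (gs : List (String × List String)) (jl cl : String)
    (h : ∀ g ∈ gs, (g.1 :: g.2).contains jl = false) :
    pvALoop gs jl cl = false := by
  induction gs with
  | nil => rfl
  | cons g rest ih =>
    simp only [pvALoop]
    rw [h g (by simp)]
    simpa using ih (fun g hg => h g (by simp [hg]))

lemma pvLookup_none_of_notmem (gs : List (String × List String)) (x : String)
    (h : ∀ g ∈ gs, (g.1 :: g.2).contains x = false) :
    pvLookup gs x = none := by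
  induction gs with
  | nil => rfl
  | cons g rest ih =>
    simp only [pvLookup]
    rw [h g (by simp)]
    simpa using ih (fun g hg => h g (by simp [hg]))

lemma pvLookup_mem_of_none (gs : List (String × List String)) (x : String)
    (h : pvLookup gs x = none) :
    ∀ g ∈ gs, (g.1 :: g.2).contains x = false := by
  induction gs with
  | nil => simp
  | cons g rest ih =>
    simp only [pvLookup] at h
    by_cases hc : (g.1 :: g.2).contains x = true
    · rw [if_pos hc] at h; exact absurd h (by simp)
    · rw [if_neg hc] at h
      intro g' hg'
      rcases List.mem_cons.mp hg' with he | he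
      · subst he; simpa using hc
      · exact ih h g' he

lemma pvLookup_eq_some (gs : List (String × List String)) (x v : String)
    (h : pvLookup gs x = some v) :
    ∃ g ∈ gs, v = g.1 ∧ (g.1 :: g.2).contains x = true := by
  induction gs with
  | nil => simp [pvLookup] at h
  | cons g rest ih =>
    simp only [pvLookup] at h
    by_cases hc : (g.1 :: g.2).contains x = true
    · rw [if_pos hc] at h
      exact ⟨g, by simp, by simpa using h.symm, hc⟩
    · rw [if_neg hc] at h
      obtain ⟨g', hg', hv, hcx⟩ := ih h
      exact ⟨g', by simp [hg'], hv, hcx⟩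

def pvDisj (g h : String × List String) : Prop :=
  ∀ f, (g.1 :: g.2).contains f = true → (h.1 :: h.2).contains f = false

lemma pvSynonyms_disj : List.Pairwise pvDisj pvSynonyms := by
  have h : List.Pairwise
      (fun g h : String × List String =>
        ((g.1 :: g.2).all (fun f => !((h.1 :: h.2).contains f))) = true) pvSynonyms := by
    decide
  refine h.imp ?_
  intro g h hall f hf
  have := List.all_eq_true.mp hall f (by simpa using hf)
  simpa using this

-- A's loop as a function of the two reference lookups
lemma pvMain (gs : List (String × List String)) (hp : List.Pairwise pvDisj gs)
    (jl cl : String) :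
    pvALoop gs jl cl =
      (match pvLookup gs jl with
       | none => false
       | some group => pvLookup gs cl == some group) := by
  induction gs with
  | nil => rfl
  | cons g rest ih =>
    obtain ⟨hd, hrest⟩ := List.pairwise_cons.mp hp
    have ih := ih hrest
    simp only [pvALoop, pvLookup]
    by_cases hj : (g.1 :: g.2).contains jl = true
    · by_cases hc : (g.1 :: g.2).contains cl = true
      · rw [if_pos (by rw [hj, hc]; rfl), if_pos hj, if_pos hc]
        simp
      · have hc' : (g.1 :: g.2).contains cl = false := Bool.eq_false_iff.mpr hc
        have hcond : ((g.1 :: g.2).contains jl && (g.1 :: g.2).contains cl) = false := by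
          rw [hc']; simp
        rw [if_pos hj, if_neg hc, if_neg (fun h => Bool.false_ne_true (hcond ▸ h)),
          pvALoop_false_of_notmem rest jl cl (fun h hh => hd h hh jl hj)]
        cases hrc : pvLookup rest cl with
        | none => simp
        | some v =>
          obtain ⟨h, hh, hv, hcx⟩ := pvLookup_eq_some rest cl v hrc
          have hg1 : (h.1 :: h.2).contains g.1 = false := hd h hh g.1 (by simp)
          have hne : v ≠ g.1 := by
            intro he; rw [hv] at he; rw [he] at hg1; simp at hg1
          simp [hne]
    · have hj' : (g.1 :: g.2).contains jl = false := Bool.eq_false_iff.mpr hj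
      have hcond : ((g.1 :: g.2).contains jl && (g.1 :: g.2).contains cl) = false := by
        rw [hj']; simp
      rw [if_neg (fun h => Bool.false_ne_true (hcond ▸ h)), if_neg hj]
      cases hrj : pvLookup rest jl with
      | none => rw [ih, hrj]
      | some v =>
        obtain ⟨h, hh, hv, hjx⟩ := pvLookup_eq_some rest jl v hrj
        by_cases hc : (g.1 :: g.2).contains cl = true
        · rw [if_pos hc]
          have hrc : pvLookup rest cl = none :=
            pvLookup_none_of_notmem rest cl (fun h' hh' => hd h' hh' cl hc)
          have hg1 : (h.1 :: h.2).contains g.1 = false := hd h hh g.1 (by simp)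
          have hne : g.1 ≠ v := by
            intro he; rw [hv] at he; rw [he] at hg1; simp at hg1
          rw [ih, hrj, hrc]
          simp [hne]
        · rw [if_neg hc, ih, hrj]

-- a string with no group is distinct from every canonical name found by lookup
lemma pvNone_ne_canon (x y v : String) (hx : pvLookup pvSynonyms x = none)
    (hy : pvLookup pvSynonyms y = some v) : x ≠ v := by
  obtain ⟨g, hg, hv, _⟩ := pvLookup_eq_some pvSynonyms y v hy
  intro he
  have hnx := pvLookup_mem_of_none pvSynonyms x hx g hg
  rw [he, hv] at hnx
  simp at hnx

-- ===== VERDICT (by name: the statement is the Claim_ definition above) =====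
theorem geometries_match_py_spec : Claim_equal_geometries_match_py := by
  intro json_geom calc_geom _
  unfold Spec_geometries_match_py
  show geometries_match_py json_geom calc_geom = geometries_match_py_alt json_geom calc_geom
  unfold geometries_match_py geometries_match_py_alt
  by_cases h1 : (json_geom.isEmpty || calc_geom.isEmpty) = true
  · rw [if_pos h1, if_pos h1]
  · rw [if_neg h1, if_neg h1]
    generalize PySem.Str.strip (PySem.Str.lower json_geom) = jl
    generalize PySem.Str.strip (PySem.Str.lower calc_geom) = cl
    show (if jl == cl then true else pvALoop pvSynonyms jl cl) =
         (pvCanon.getD jl jl == pvCanon.getD cl cl)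
    rw [PySem.Dict.getD_eq_get?_getD, PySem.Dict.getD_eq_get?_getD,
      pvCanon_get?, pvCanon_get?]
    by_cases h2 : jl = cl
    · subst h2; simp
    · rw [if_neg (by simpa using h2), pvMain pvSynonyms pvSynonyms_disj]
      cases hj : pvLookup pvSynonyms jl with
      | none =>
        cases hc : pvLookup pvSynonyms cl with
        | none => simp [h2]
        | some v =>
          have hne : jl ≠ v := pvNone_ne_canon jl cl v hj hc
          simp [beq_eq_false_iff_ne.mpr hne]
      | some v =>
        cases hc : pvLookup pvSynonyms cl with
        | none =>
          have hne : cl ≠ v := pvNone_ne_canon cl jl v hc hj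
          simp [beq_eq_false_iff_ne.mpr (fun he : v = cl => hne he.symm)]
        | some w =>
          by_cases hvw : v = w
          · subst hvw; simp
          · simp [beq_eq_false_iff_ne.mpr hvw,
              beq_eq_false_iff_ne.mpr (fun he : w = v => hvw he.symm)]
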